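-- pv_equiv track=rewrite | github.com/LeftCoder17/LaLiga-Analysis-and-Predictions | quiniela/io.py | numerical_last_results_local
-- ===== SOURCE A (Python) =====
-- def numerical_last_results_local(last_results_list):
--     total = 0
--     for result in last_results_list:
--         if result == 'W':
--             total += 3
--         elif result == 'T':
--             total += 1
--         else:
--             total += -3
--     return total
-- ===== SOURCE B (Python) =====
-- def numerical_last_results_local(last_results_list):
--     w = last_results_list.count('W')
--     t = last_results_list.count('T')
--     n = len(last_results_list)
--     return 3 * w + t - 3 * (n - w - t)
-- ===== Notes on version B (the rewrite author's own statement) =====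
-- stated objective: alternative
-- what changed: Replaces the single element-by-element accumulation loop with count-then-combine: count 'W' and 'T' occurrences and compute the total with one closed arithmetic formula (the else branch becomes the n-w-t remainder).
import Mathlib
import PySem

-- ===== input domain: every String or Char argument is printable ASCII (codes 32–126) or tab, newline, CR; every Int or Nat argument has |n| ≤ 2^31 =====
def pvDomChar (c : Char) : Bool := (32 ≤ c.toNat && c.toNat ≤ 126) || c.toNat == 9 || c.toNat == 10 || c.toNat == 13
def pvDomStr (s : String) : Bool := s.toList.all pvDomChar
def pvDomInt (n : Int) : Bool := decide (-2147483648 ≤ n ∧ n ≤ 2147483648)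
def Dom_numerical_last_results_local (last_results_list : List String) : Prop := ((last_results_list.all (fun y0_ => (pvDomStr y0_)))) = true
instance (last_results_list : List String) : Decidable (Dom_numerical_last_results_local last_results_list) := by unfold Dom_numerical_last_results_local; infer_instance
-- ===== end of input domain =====

-- B replaces A's single accumulation loop by counting 'W' and 'T' and a closed arithmetic combination (alternative decomposition, same cost).

-- ===== PORT A =====
def numerical_last_results_local (last_results_list : List String) : Int :=
  last_results_list.foldl
    (fun total result =>
      if result == "W" then total + 3
      else if result == "T" then total + 1
      else total + (-3)) 0

-- ===== PORT B =====
def numerical_last_results_local_alt (last_results_list : List String) : Int :=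
  let w : Int := (PySem.List.count last_results_list "W" : Int)
  let t : Int := (PySem.List.count last_results_list "T" : Int)
  let n : Int := (last_results_list.length : Int)
  3 * w + t - 3 * (n - w - t)

-- ===== PRECONDITION & SPEC =====
def Spec_numerical_last_results_local (last_results_list : List String) (out : Int) : Prop := out = numerical_last_results_local_alt last_results_list
instance (last_results_list : List String) (out : Int) : Decidable (Spec_numerical_last_results_local last_results_list out) := by unfold Spec_numerical_last_results_local; infer_instance

-- ===== CLAIM (what is proved, stated in full; the proofs are below) =====
def Claim_equal_numerical_last_results_local : Prop := ∀ (last_results_list : List String), Dom_numerical_last_results_local last_results_list → Spec_numerical_last_results_local last_results_list (numerical_last_results_local last_results_list)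

-- ===== LEMMAS AND PROOFS =====
theorem numerical_key : ∀ (xs : List String) (a : Int),
    xs.foldl (fun total result =>
      if result == "W" then total + 3
      else if result == "T" then total + 1
      else total + (-3)) a
    = a + 3 * (xs.count "W" : Int) + (xs.count "T" : Int)
        - 3 * ((xs.length : Int) - (xs.count "W" : Int) - (xs.count "T" : Int)) := by
  intro xs
  induction xs with
  | nil => intro a; simp
  | cons x xs ih =>
    intro a
    simp only [List.foldl_cons, ih, List.count_cons, List.length_cons]
    by_cases hw : x = "W" <;> by_cases ht : x = "T" <;>
      simp [hw, ht] <;> ring_nf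

-- ===== VERDICT (by name: the statement is the Claim_ definition above) =====
theorem numerical_last_results_local_spec : Claim_equal_numerical_last_results_local := by
  intro xs _
  unfold Spec_numerical_last_results_local numerical_last_results_local numerical_last_results_local_alt
  rw [numerical_key]
  simp [PySem.List.count]
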